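-- pv_equiv track=rewrite | github.com/JBeggs/products | gumtree_crawler/db.py | listing_matches_ignore
-- ===== SOURCE A (Python) =====
-- def listing_matches_ignore(listing: dict, rules: list[dict]) -> bool:
--     """Check if listing matches any ignore rule."""
--
--     url = (listing.get("url") or "").lower()
--     ad_id = str(listing.get("ad_id") or "")
--     title = (listing.get("title") or "").lower()
--     seller = (listing.get("seller") or "").lower()
--     for rule in rules:
--         rule_type = (rule.get("rule_type") or "").lower()
--         value = (rule.get("value") or "").strip().lower()
--         if not value:
--             continue
--         if rule_type == "url" and value in url:
--             return True
--         if rule_type == "ad_id" and value == ad_id.lower():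
--             return True
--         if rule_type == "title_keyword" and value in title:
--             return True
--         if rule_type == "seller" and value in seller:
--             return True
--     return False
-- ===== SOURCE B (Python) =====
-- def listing_matches_ignore(listing: dict, rules: list[dict]) -> bool:
--     """Check if listing matches any ignore rule."""
--
--     # First pass: bucket the cleaned rule values by rule type.
--     urls, ids, kws, sellers = [], [], [], []
--     for rule in rules:
--         rule_type = (rule.get("rule_type") or "").lower()
--         value = (rule.get("value") or "").strip().lower()
--         if not value:
--             continue
--         if rule_type == "url":
--             urls.append(value)
--         elif rule_type == "ad_id":
--             ids.append(value)
--         elif rule_type == "title_keyword":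
--             kws.append(value)
--         elif rule_type == "seller":
--             sellers.append(value)
--     # Second phase: test each listing field against its bucket.
--     url = (listing.get("url") or "").lower()
--     ad_id = str(listing.get("ad_id") or "").lower()
--     title = (listing.get("title") or "").lower()
--     seller = (listing.get("seller") or "").lower()
--     return (any(v in url for v in urls)
--             or ad_id in ids
--             or any(v in title for v in kws)
--             or any(v in seller for v in sellers))
-- ===== Notes on version B (the rewrite author's own statement) =====
-- stated objective: alternative
-- what changed: Instead of testing each rule against the listing inside one early-returning scan, B first partitions the cleaned rule values into four per-type buckets and then tests each precomputed listing field against its bucket (substring for url/title_keyword/seller, equality for ad_id), OR-ing the bucket results.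
import Mathlib
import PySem

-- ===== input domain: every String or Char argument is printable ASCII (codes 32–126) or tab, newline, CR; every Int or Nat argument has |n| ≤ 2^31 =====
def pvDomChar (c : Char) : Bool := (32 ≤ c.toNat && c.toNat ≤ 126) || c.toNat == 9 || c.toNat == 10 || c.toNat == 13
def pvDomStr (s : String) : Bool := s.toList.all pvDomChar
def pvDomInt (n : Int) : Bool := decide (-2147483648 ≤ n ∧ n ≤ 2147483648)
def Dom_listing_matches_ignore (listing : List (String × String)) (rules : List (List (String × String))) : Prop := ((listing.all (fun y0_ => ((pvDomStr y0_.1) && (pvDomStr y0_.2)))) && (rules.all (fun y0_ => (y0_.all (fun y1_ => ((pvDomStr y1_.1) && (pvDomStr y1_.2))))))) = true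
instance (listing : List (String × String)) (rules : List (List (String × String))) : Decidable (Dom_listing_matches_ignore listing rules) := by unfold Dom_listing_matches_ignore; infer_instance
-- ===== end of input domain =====

-- B buckets the cleaned rule values by rule type in a first pass, then tests each listing
-- field against its bucket; same boolean result as A's single early-returning scan (alternative decomposition).


-- ===== PORT A =====
-- (listing.get(k) or "")  — values are strings, so 'or ""' is the identity on the looked-up string
def pvGet (d : List (String × String)) (k : String) : String :=
  (PySem.Dict.mk d).getD k ""

-- the for-loop of A with its early returns, branches in source order
def pvALoop (url adid title seller : String) : List (List (String × String)) → Bool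
  | [] => false
  | rule :: rest =>
    let rt := PySem.Str.lower (pvGet rule "rule_type")
    let v := PySem.Str.lower (PySem.Str.strip (pvGet rule "value"))
    if v = "" then pvALoop url adid title seller rest
    else if rt = "url" && PySem.Str.isIn v url then true
    else if rt = "ad_id" && v == PySem.Str.lower adid then true
    else if rt = "title_keyword" && PySem.Str.isIn v title then true
    else if rt = "seller" && PySem.Str.isIn v seller then true
    else pvALoop url adid title seller rest

def listing_matches_ignore (listing : List (String × String)) (rules : List (List (String × String))) : Bool :=
  let url := PySem.Str.lower (pvGet listing "url")
  let adid := pvGet listing "ad_id"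
  let title := PySem.Str.lower (pvGet listing "title")
  let seller := PySem.Str.lower (pvGet listing "seller")
  pvALoop url adid title seller rules

-- ===== PORT B =====
-- one step of B's bucketing pass: distribute the cleaned value into one of the four buckets
def pvBStep (acc : List String × List String × List String × List String)
    (rule : List (String × String)) : List String × List String × List String × List String :=
  let rt := PySem.Str.lower (pvGet rule "rule_type")
  let v := PySem.Str.lower (PySem.Str.strip (pvGet rule "value"))
  if v = "" then acc
  else if rt = "url" then (acc.1 ++ [v], acc.2.1, acc.2.2.1, acc.2.2.2)
  else if rt = "ad_id" then (acc.1, acc.2.1 ++ [v], acc.2.2.1, acc.2.2.2)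
  else if rt = "title_keyword" then (acc.1, acc.2.1, acc.2.2.1 ++ [v], acc.2.2.2)
  else if rt = "seller" then (acc.1, acc.2.1, acc.2.2.1, acc.2.2.2 ++ [v])
  else acc

def listing_matches_ignore_alt (listing : List (String × String)) (rules : List (List (String × String))) : Bool :=
  let b := rules.foldl pvBStep ([], [], [], [])
  let url := PySem.Str.lower (pvGet listing "url")
  let adid := PySem.Str.lower (pvGet listing "ad_id")
  let title := PySem.Str.lower (pvGet listing "title")
  let seller := PySem.Str.lower (pvGet listing "seller")
  b.1.any (fun v => PySem.Str.isIn v url) || b.2.1.contains adid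
    || b.2.2.1.any (fun v => PySem.Str.isIn v title) || b.2.2.2.any (fun v => PySem.Str.isIn v seller)

-- ===== PRECONDITION & SPEC =====
def Spec_listing_matches_ignore (listing : List (String × String)) (rules : List (List (String × String))) (out : Bool) : Prop := out = listing_matches_ignore_alt listing rules
instance (listing : List (String × String)) (rules : List (List (String × String))) (out : Bool) : Decidable (Spec_listing_matches_ignore listing rules out) := by unfold Spec_listing_matches_ignore; infer_instance

-- ===== CLAIM (what is proved, stated in full; the proofs are below) =====
def Claim_equal_listing_matches_ignore : Prop := ∀ (listing : List (String × String)) (rules : List (List (String × String))), Dom_listing_matches_ignore listing rules → Spec_listing_matches_ignore listing rules (listing_matches_ignore listing rules)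

-- ===== LEMMAS AND PROOFS =====

-- B's bucket test, as a function of the four bucket lists
def pvBCheck (url adid title seller : String)
    (b : List String × List String × List String × List String) : Bool :=
  b.1.any (fun v => PySem.Str.isIn v url) || b.2.1.contains adid
    || b.2.2.1.any (fun v => PySem.Str.isIn v title) || b.2.2.2.any (fun v => PySem.Str.isIn v seller)

theorem pvLoop_eq (url adid title seller : String) :
    ∀ (rules : List (List (String × String))) (acc : List String × List String × List String × List String),
      pvBCheck url (PySem.Str.lower adid) title seller (rules.foldl pvBStep acc)
        = (pvBCheck url (PySem.Str.lower adid) title seller acc || pvALoop url adid title seller rules) := by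
  intro rules
  induction rules with
  | nil => intro acc; simp [pvALoop]
  | cons rule rest ih =>
    intro acc
    simp only [List.foldl_cons, pvALoop]
    rw [ih]
    simp only [pvBStep]
    by_cases hv : PySem.Str.lower (PySem.Str.strip (pvGet rule "value")) = ""
    · simp [hv]
    · simp only [if_neg hv]
      set rt := PySem.Str.lower (pvGet rule "rule_type") with hrt
      set v := PySem.Str.lower (PySem.Str.strip (pvGet rule "value")) with hvv
      by_cases h1 : rt = "url"
      · have h2 : rt ≠ "ad_id" := by rw [h1]; decide
        have h3 : rt ≠ "title_keyword" := by rw [h1]; decide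
        have h4 : rt ≠ "seller" := by rw [h1]; decide
        simp [pvBCheck, h1, h2, h3, h4, List.any_append, Bool.or_comm, Bool.or_assoc,
          Bool.or_left_comm]
      · by_cases h2 : rt = "ad_id"
        · have h3 : rt ≠ "title_keyword" := by rw [h2]; decide
          have h4 : rt ≠ "seller" := by rw [h2]; decide
          by_cases hp : v = PySem.Str.lower adid
          · simp [pvBCheck, h1, h2, h3, h4, hp, Bool.or_comm, Bool.or_assoc,
              Bool.or_left_comm]
          · have hp' : PySem.Str.lower adid ≠ v := fun h => hp h.symm
            simp [pvBCheck, h1, h2, h3, h4, hp, hp', Bool.or_comm, Bool.or_assoc,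
              Bool.or_left_comm]
        · by_cases h3 : rt = "title_keyword"
          · have h4 : rt ≠ "seller" := by rw [h3]; decide
            simp [pvBCheck, h1, h2, h3, h4, List.any_append, Bool.or_comm, Bool.or_assoc,
              Bool.or_left_comm]
          · by_cases h4 : rt = "seller"
            · simp [pvBCheck, h1, h2, h3, h4, List.any_append, Bool.or_comm, Bool.or_assoc,
                Bool.or_left_comm]
            · simp [h1, h2, h3, h4]

-- ===== VERDICT (by name: the statement is the Claim_ definition above) =====
theorem listing_matches_ignore_spec : Claim_equal_listing_matches_ignore := by
  intro listing rules _
  unfold Spec_listing_matches_ignore listing_matches_ignore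
  have halt : listing_matches_ignore_alt listing rules
      = pvBCheck (PySem.Str.lower (pvGet listing "url")) (PySem.Str.lower (pvGet listing "ad_id"))
          (PySem.Str.lower (pvGet listing "title")) (PySem.Str.lower (pvGet listing "seller"))
          (rules.foldl pvBStep ([], [], [], [])) := rfl
  rw [halt, pvLoop_eq]
  simp [pvBCheck]
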